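-- pv_equiv track=rewrite | github.com/cafe-jun/codingTest-Algo | programmers/2019카카오겨울인턴쉽/불량회원.py | id_mapping
-- ===== SOURCE A (Python) =====
-- def id_mapping(user_id, banner_id):
--     is_check = False
--     if len(banner_id) == len(user_id):
--         for i in range(len(banner_id)):
--             if banner_id[i] != '*' and user_id[i] != banner_id[i]:
--                 break
--         else:
--             is_check = True
--     return is_check
-- ===== SOURCE B (Python) =====
-- def id_mapping(user_id, banner_id):
--     # Segment-based matching: compare the maximal literal segments of
--     # banner_id (the stretches between '*' wildcards) against the
--     # corresponding slices of user_id; wildcard positions are skipped.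
--     if len(user_id) != len(banner_id):
--         return False
--     start = 0
--     while True:
--         j = banner_id.find('*', start)
--         if j == -1:
--             return user_id[start:] == banner_id[start:]
--         if user_id[start:j] != banner_id[start:j]:
--             return False
--         start = j + 1
-- ===== Notes on version B (the rewrite author's own statement) =====
-- stated objective: faster
-- what changed: Replaced the per-character index loop with break/else and a mutable flag by segment-based matching: locate each '*' with str.find and compare the literal stretches between wildcards as whole slices, skipping wildcard positions.
import Mathlib
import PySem

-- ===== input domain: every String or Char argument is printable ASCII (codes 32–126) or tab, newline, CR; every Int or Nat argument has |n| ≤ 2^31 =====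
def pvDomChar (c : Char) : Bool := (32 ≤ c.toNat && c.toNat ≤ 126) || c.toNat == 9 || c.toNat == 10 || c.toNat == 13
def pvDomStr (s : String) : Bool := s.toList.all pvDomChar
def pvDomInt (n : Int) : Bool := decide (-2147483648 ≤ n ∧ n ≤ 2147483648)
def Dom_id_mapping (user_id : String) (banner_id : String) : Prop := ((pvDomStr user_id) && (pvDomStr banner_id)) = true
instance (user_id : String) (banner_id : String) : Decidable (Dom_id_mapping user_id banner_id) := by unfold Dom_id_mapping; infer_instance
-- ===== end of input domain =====

-- B replaces A's per-character index loop with break/else and a mutable flag by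
-- segment-based matching: find each '*' and compare the literal stretches between
-- wildcards as whole slices; objective: faster (constant factor in CPython).


-- ===== PORT A =====
-- the for-loop over range(len(banner_id)) with break/else; `i` is the loop index.
-- Called only with u.length = b.length (the branch guard), so `u.getD i ' '` is u[i].
def pvLoopA (u b : List Char) (i : Nat) : Bool :=
  if h : i < b.length then
    if b[i] != '*' && u.getD i ' ' != b[i] then false
    else pvLoopA u b (i + 1)
  else true
termination_by b.length - i

def id_mapping (user_id : String) (banner_id : String) : Bool :=
  let u := user_id.toList
  let b := banner_id.toList
  -- is_check = False; if lengths equal run the loop; for-else sets is_check = True iff no break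
  if b.length == u.length then pvLoopA u b 0 else false

-- ===== PORT B =====
-- Source B's while-True loop; `start` only ever increases, so fuel b.length + 1 is a
-- totality guard only (the fuel-0 branch is unreachable, proved in the lemmas below).
def pvLoopB (u b : List Char) (start : Nat) (fuel : Nat) : Bool :=
  match fuel with
  | 0 => false
  | fuel + 1 =>
    let j := PySem.Chars.findFrom b ['*'] (start : Int) none   -- banner_id.find('*', start)
    if j = -1 then
      PySem.List.slice u (some (start : Int)) none == PySem.List.slice b (some (start : Int)) none
    else if PySem.List.slice u (some (start : Int)) (some j) ≠ PySem.List.slice b (some (start : Int)) (some j) then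
      false
    else
      pvLoopB u b (j.toNat + 1) fuel

def id_mapping_alt (user_id : String) (banner_id : String) : Bool :=
  let u := user_id.toList
  let b := banner_id.toList
  if u.length ≠ b.length then false
  else pvLoopB u b 0 (b.length + 1)

-- ===== PRECONDITION & SPEC =====
def Spec_id_mapping (user_id : String) (banner_id : String) (out : Bool) : Prop := out = id_mapping_alt user_id banner_id
instance (user_id : String) (banner_id : String) (out : Bool) : Decidable (Spec_id_mapping user_id banner_id out) := by unfold Spec_id_mapping; infer_instance

-- ===== CLAIM (what is proved, stated in full; the proofs are below) =====
def Claim_equal_id_mapping : Prop := ∀ (user_id : String) (banner_id : String), Dom_id_mapping user_id banner_id → Spec_id_mapping user_id banner_id (id_mapping user_id banner_id)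

-- ===== LEMMAS AND PROOFS =====

-- abbreviation for the per-position predicate of the zip-all characterisation
def pvOK (p : Char × Char) : Bool := p.2 == '*' || p.1 == p.2

-- A's loop computes the zip-all characterisation
theorem pvLoopA_eq_all : ∀ (k i : Nat) (u b : List Char), u.length = b.length → b.length - i = k →
    pvLoopA u b i = ((u.drop i).zip (b.drop i)).all pvOK := by
  intro k
  induction k with
  | zero =>
    intro i u b hlen hk
    unfold pvLoopA
    rw [dif_neg (by omega)]
    rw [List.drop_eq_nil_of_le (by omega), List.drop_eq_nil_of_le (by omega)]
    rfl
  | succ k ih =>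
    intro i u b hlen hk
    have hb : i < b.length := by omega
    have hu : i < u.length := by omega
    unfold pvLoopA
    rw [dif_pos hb]
    rw [List.drop_eq_getElem_cons hb, List.drop_eq_getElem_cons hu]
    rw [List.zip_cons_cons, List.all_cons]
    rw [ih (i + 1) u b hlen (by omega)]
    rw [List.getD_eq_getElem u ' ' hu]
    by_cases h1 : b[i] = '*'
    · simp [pvOK, h1]
    · by_cases h2 : u[i] = b[i] <;> simp [pvOK, h1, h2]

-- with no wildcard in b, the zip-all test is plain list equality
theorem pvAll_no_star : ∀ (b u : List Char), u.length = b.length → '*' ∉ b →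
    ((u.zip b).all pvOK) = decide (u = b) := by
  intro b
  induction b with
  | nil => intro u h _; cases u <;> simp_all
  | cons bc bt ih =>
    intro u h hmem
    cases u with
    | nil => simp at h
    | cons uc ut =>
      have hbc : bc ≠ '*' := fun hh => hmem (hh ▸ List.mem_cons_self)
      have := ih ut (by simpa using h) (fun hh => hmem (List.mem_cons_of_mem _ hh))
      by_cases h2 : uc = bc <;>
        simp [pvOK, this, h2, hbc]

-- splitting the zip-all test at a wildcard position
theorem pvAll_split : ∀ (b1 u1 : List Char) (uc : Char) (u2 b2 : List Char),
    u1.length = b1.length → '*' ∉ b1 →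
    (((u1 ++ uc :: u2).zip (b1 ++ '*' :: b2)).all pvOK)
      = (decide (u1 = b1) && ((u2.zip b2).all pvOK)) := by
  intro b1
  induction b1 with
  | nil => intro u1 uc u2 b2 h _; cases u1 <;> simp_all [pvOK]
  | cons bc bt ih =>
    intro u1 uc u2 b2 h hmem
    cases u1 with
    | nil => simp at h
    | cons c ut =>
      have hbc : bc ≠ '*' := fun hh => hmem (hh ▸ List.mem_cons_self)
      have := ih ut uc u2 b2 (by simpa using h) (fun hh => hmem (List.mem_cons_of_mem _ hh))
      by_cases h2 : c = bc <;>
        simp [pvOK, this, h2, hbc]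

-- [c] is a prefix of l.drop k  ↔  l[k]? = some c
theorem pvSingleton_prefix_drop {c : Char} {l : List Char} {k : Nat} :
    [c] <+: l.drop k ↔ l[k]? = some c := by
  constructor
  · rintro ⟨t, ht⟩
    have hk : k < l.length := by
      by_contra hge
      rw [List.drop_eq_nil_of_le (by omega)] at ht
      exact absurd ht (by simp)
    rw [List.drop_eq_getElem_cons hk] at ht
    rw [List.getElem?_eq_getElem hk]
    injection ht with h1 _
    exact congrArg some h1.symm
  · intro hc
    have hk : k < l.length := by
      by_contra hge
      rw [List.getElem?_eq_none (by omega)] at hc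
      exact absurd hc (by simp)
    rw [List.getElem?_eq_getElem hk] at hc
    exact ⟨l.drop (k + 1), by
      rw [List.drop_eq_getElem_cons hk]
      injection hc with h1
      simp [h1]⟩

-- B's loop computes the zip-all characterisation of the remaining suffixes
theorem pvLoopB_eq_all : ∀ (fuel start : Nat) (u b : List Char), u.length = b.length →
    start ≤ b.length → b.length + 1 - start ≤ fuel →
    pvLoopB u b start fuel = ((u.drop start).zip (b.drop start)).all pvOK := by
  intro fuel
  induction fuel with
  | zero => intro start u b _ h1 h2; omega
  | succ fuel ih =>
    intro start u b hlen hstart hfuel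
    unfold pvLoopB
    set j := PySem.Chars.findFrom b ['*'] (start : Int) none with hj
    by_cases hneg : j = -1
    · -- no '*' in b.drop start: both sides are plain equality of the suffixes
      rw [if_pos hneg]
      have hnostar : ¬ ['*'] <:+: b.drop start := by
        rw [← PySem.Chars.findFrom_natCast_eq_neg_one_iff b ['*'] start hstart]
        exact hneg
      have hmem : '*' ∉ b.drop start := by
        intro hm
        obtain ⟨s, t, hst⟩ := List.append_of_mem hm
        exact hnostar ⟨s, t, by simp [hst]⟩
      rw [PySem.List.slice_from_natCast, PySem.List.slice_from_natCast,
        pvAll_no_star (b.drop start) (u.drop start) (by simp [hlen]) hmem]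
      by_cases heq : u.drop start = b.drop start <;> simp [heq]
    · -- a '*' at index n = j.toNat: compare the literal segment, recurse past the star
      obtain ⟨hge, hpre, hmin⟩ := PySem.Chars.findFrom_natCast_spec b ['*'] start hstart hneg
      rw [if_neg hneg]
      set n := j.toNat with hn
      have hj0 : j = (n : Int) := by
        have : (0 : Int) ≤ j := le_trans (by positivity) hge
        omega
      have hbn : b[n]? = some '*' := pvSingleton_prefix_drop.mp hpre
      have hnb : n < b.length := by
        by_contra hge2
        rw [List.getElem?_eq_none (by omega)] at hbn
        exact absurd hbn (by simp)
      have hnu : n < u.length := by omega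
      have hsn : start ≤ n := by omega
      have hbng : b[n] = '*' := by
        rw [List.getElem?_eq_getElem hnb] at hbn; injection hbn
      set m := n - start with hm
      have hbdrop : b.drop start = (b.drop start).take m ++ '*' :: b.drop (n + 1) := by
        conv_lhs => rw [← List.take_append_drop m (b.drop start)]
        rw [List.drop_drop, (by omega : start + m = n), List.drop_eq_getElem_cons hnb, hbng]
      have hudrop : u.drop start = (u.drop start).take m ++ u[n] :: u.drop (n + 1) := by
        conv_lhs => rw [← List.take_append_drop m (u.drop start)]
        rw [List.drop_drop, (by omega : start + m = n), List.drop_eq_getElem_cons hnu]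
      have hlen1 : ((u.drop start).take m).length = ((b.drop start).take m).length := by
        simp [hlen]
      have hstar1 : '*' ∉ (b.drop start).take m := by
        intro hmem
        obtain ⟨i, hi, hgi⟩ := List.getElem_of_mem hmem
        have him : i < m := lt_of_lt_of_le hi (by simp)
        have : b[start + i]? = some '*' := by
          rw [List.getElem_take, List.getElem_drop] at hgi
          rw [List.getElem?_eq_getElem (by omega), hgi]
        exact hmin (start + i) (by omega) (by omega) (pvSingleton_prefix_drop.mpr this)
      have hslice : ∀ (l : List Char), PySem.List.slice l (some (start : Int)) (some j)
          = (l.drop start).take m := by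
        intro l
        rw [hj0, PySem.List.slice_natCast, hm]
      rw [hslice u, hslice b]
      rw [ih (n + 1) u b hlen (by omega) (by omega)]
      conv_rhs => rw [hudrop, hbdrop]
      rw [pvAll_split _ _ _ _ _ hlen1 hstar1]
      by_cases heq : (u.drop start).take m = (b.drop start).take m
      · simp [heq]
      · simp [heq]

theorem id_mapping_spec : Claim_equal_id_mapping := by
  intro user_id banner_id _
  unfold Spec_id_mapping id_mapping id_mapping_alt
  by_cases h : banner_id.toList.length = user_id.toList.length
  · have hA := pvLoopA_eq_all (banner_id.toList.length) 0 user_id.toList banner_id.toList h.symm (by omega)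
    have hB := pvLoopB_eq_all (banner_id.toList.length + 1) 0 user_id.toList banner_id.toList h.symm (by omega) (by omega)
    simp only [List.drop_zero] at hA hB
    have hbeq : (banner_id.toList.length == user_id.toList.length) = true := by simpa using h
    rw [if_pos hbeq, if_neg (fun hh => hh h.symm), hA, hB]
  · have hbeq : (banner_id.toList.length == user_id.toList.length) = false := by simpa using h
    rw [if_neg (fun hh => h (by simpa using hh)), if_pos (fun hh => h hh.symm)]
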